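-- pv_equiv track=rewrite | github.com/NguyenDucHuy14287/QA_system_URA | preprocessing/preprocess_utils.py | split_and_concat_paragpraph
-- ===== SOURCE A (Python) =====
-- def split_and_concat_paragpraph(slice_text):
--     split_lst = slice_text.split("\n")
--     return_lst = []
--     text = ""
--     for sent in split_lst:
--         if sent == "":
--             if text != "":
--                 return_lst.append(text)
--                 text = ""
--         else:
--             text = text + " " + sent
--
--     if text != "":
--         return_lst.append(text)
--
--     return return_lst
-- ===== SOURCE B (Python) =====
-- def split_and_concat_paragpraph(slice_text):
--     # Two-pointer run finder: locate each maximal run of non-blank lines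
--     # and space-join it in one step (keeping the original's leading space).
--     lines = slice_text.split("\n")
--     n = len(lines)
--     out = []
--     i = 0
--     while i < n:
--         if lines[i] == "":
--             i += 1
--         else:
--             j = i
--             while j < n and lines[j] != "":
--                 j += 1
--             out.append(" " + " ".join(lines[i:j]))
--             i = j
--     return out
-- ===== Notes on version B (the rewrite author's own statement) =====
-- stated objective: alternative
-- what changed: Replaced the accumulator state machine (growing a paragraph string line by line and flushing on blanks) by a two-pointer scan that finds each maximal run of non-blank lines and space-joins it in one step.
import Mathlib
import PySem

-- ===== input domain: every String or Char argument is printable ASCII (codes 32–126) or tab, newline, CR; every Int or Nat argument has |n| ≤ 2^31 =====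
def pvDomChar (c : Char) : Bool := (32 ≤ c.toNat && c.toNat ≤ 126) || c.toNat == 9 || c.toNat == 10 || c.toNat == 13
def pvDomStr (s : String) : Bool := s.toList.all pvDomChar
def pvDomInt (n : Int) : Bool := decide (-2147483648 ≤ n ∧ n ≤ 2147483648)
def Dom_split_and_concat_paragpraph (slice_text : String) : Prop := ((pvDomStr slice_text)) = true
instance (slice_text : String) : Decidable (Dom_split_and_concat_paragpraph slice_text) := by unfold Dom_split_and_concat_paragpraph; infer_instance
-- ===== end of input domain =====

-- B replaces A's accumulator state machine by a two-pointer run finder that joins each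
-- maximal run of non-blank lines in one step (objective: alternative decomposition).

-- ===== PORT A =====
-- accumulator step: the body of A's for-loop over (return_lst, text)
def pvAStep (st : List (List Char) × List Char) (sent : List Char) :
    List (List Char) × List Char :=
  if sent = [] then
    (if st.2 = [] then st else (st.1 ++ [st.2], ([] : List Char)))
  else (st.1, st.2 ++ [' '] ++ sent)

-- A's final flush: 'if text != "": return_lst.append(text)'
def pvAFin (st : List (List Char) × List Char) : List (List Char) :=
  if st.2 = [] then st.1 else st.1 ++ [st.2]

def split_and_concat_paragpraph (slice_text : String) : List String :=
  let split_lst := PySem.Chars.splitOn slice_text.toList ['\n']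
  (pvAFin (split_lst.foldl pvAStep ([], []))).map String.mk

-- ===== PORT B =====
-- inner while loop: advance j over the run of non-blank lines, returning (run, rest)
def pvTakeRun : List (List Char) → List (List Char) × List (List Char)
  | [] => ([], [])
  | l :: ls => if l = [] then ([], l :: ls)
      else ((l :: (pvTakeRun ls).1), (pvTakeRun ls).2)

theorem pvTakeRun_rest_le : ∀ ls : List (List Char), (pvTakeRun ls).2.length ≤ ls.length := by
  intro ls
  induction ls with
  | nil => simp [pvTakeRun]
  | cons l ls ih =>
    by_cases h : l = [] <;> simp [pvTakeRun, h] <;> omega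

-- outer while loop over i: skip blank lines, else emit ' ' + ' '.join(run) and jump to rest
def pvBLoop : List (List Char) → List (List Char)
  | [] => []
  | l :: ls =>
      if l = [] then pvBLoop ls
      else ([' '] ++ PySem.Chars.join [' '] (l :: (pvTakeRun ls).1)) :: pvBLoop (pvTakeRun ls).2
termination_by ls => ls.length
decreasing_by
  · simp
  · have := pvTakeRun_rest_le ls
    simp
    omega

def split_and_concat_paragpraph_alt (slice_text : String) : List String :=
  let lines := PySem.Chars.splitOn slice_text.toList ['\n']
  (pvBLoop lines).map String.mk

-- ===== PRECONDITION & SPEC =====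
def Spec_split_and_concat_paragpraph (slice_text : String) (out : List String) : Prop := out = split_and_concat_paragpraph_alt slice_text
instance (slice_text : String) (out : List String) : Decidable (Spec_split_and_concat_paragpraph slice_text out) := by unfold Spec_split_and_concat_paragpraph; infer_instance

-- ===== CLAIM (what is proved, stated in full; the proofs are below) =====
def Claim_equal_split_and_concat_paragpraph : Prop := ∀ (slice_text : String), Dom_split_and_concat_paragpraph slice_text → Spec_split_and_concat_paragpraph slice_text (split_and_concat_paragpraph slice_text)

-- ===== LEMMAS AND PROOFS =====

theorem pvAFin_append (acc f : List (List Char)) (t : List Char) :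
    pvAFin (acc ++ f, t) = acc ++ pvAFin (f, t) := by
  unfold pvAFin; split <;> simp

theorem pvFoldl_factor : ∀ (ls : List (List Char)) (acc : List (List Char)) (t : List Char),
    ls.foldl pvAStep (acc, t)
      = (acc ++ (ls.foldl pvAStep ([], t)).1, (ls.foldl pvAStep ([], t)).2) := by
  intro ls
  induction ls with
  | nil => simp
  | cons s ls ih =>
    intro acc t
    rw [List.foldl_cons, List.foldl_cons]
    by_cases hs : s = []
    · by_cases ht : t = []
      · rw [show pvAStep (acc, t) s = (acc, t) by simp [pvAStep, hs, ht],
            show pvAStep ([], t) s = ([], t) by simp [pvAStep, hs, ht]]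
        exact ih acc t
      · rw [show pvAStep (acc, t) s = (acc ++ [t], []) by simp [pvAStep, hs, ht],
            show pvAStep ([], t) s = ([t], []) by simp [pvAStep, hs, ht]]
        rw [ih (acc ++ [t]) [], ih [t] []]
        simp
    · rw [show pvAStep (acc, t) s = (acc, t ++ [' '] ++ s) by simp [pvAStep, hs],
          show pvAStep ([], t) s = ([], t ++ [' '] ++ s) by simp [pvAStep, hs]]
      exact ih acc (t ++ [' '] ++ s)

theorem pvJoinSp : ∀ (r : List (List Char)) (s : List Char),
    PySem.Chars.join [' '] (s :: r) = s ++ r.flatMap (fun x => ' ' :: x) := by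
  intro r
  induction r with
  | nil => intro s; simp [PySem.Chars.join, List.intercalate]
  | cons b r ih =>
    intro s
    simp only [PySem.Chars.join, List.intercalate] at *
    simp [List.intersperse] at *
    simp [ih b]

theorem pvMain : ∀ ls : List (List Char),
    pvAFin (ls.foldl pvAStep ([], [])) = pvBLoop ls ∧
    (∀ t : List Char, t ≠ [] →
      pvAFin (ls.foldl pvAStep ([], t))
        = (t ++ (pvTakeRun ls).1.flatMap (fun x => ' ' :: x)) :: pvBLoop (pvTakeRun ls).2) := by
  intro ls
  induction ls with
  | nil =>
    constructor
    · simp [pvAFin, pvBLoop]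
    · intro t ht; simp [pvAFin, pvTakeRun, pvBLoop, ht]
  | cons s ls ih =>
    obtain ⟨P, Q⟩ := ih
    constructor
    · rw [List.foldl_cons]
      by_cases hs : s = []
      · rw [show pvAStep ([], []) s = ([], []) by simp [pvAStep, hs]]
        rw [P, show pvBLoop (s :: ls) = pvBLoop ls by rw [pvBLoop]; simp [hs]]
      · rw [show pvAStep ([], []) s = ([], [] ++ [' '] ++ s) by simp [pvAStep, hs]]
        rw [Q ([] ++ [' '] ++ s) (by simp)]
        rw [show pvBLoop (s :: ls)
              = ([' '] ++ PySem.Chars.join [' '] (s :: (pvTakeRun ls).1))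
                  :: pvBLoop (pvTakeRun ls).2 by rw [pvBLoop]; simp [hs]]
        simp [pvJoinSp]
    · intro t ht
      rw [List.foldl_cons]
      by_cases hs : s = []
      · rw [show pvAStep ([], t) s = ([t], []) by simp [pvAStep, hs, ht]]
        rw [show ([t] : List (List Char)) = [t] ++ [] by simp, pvFoldl_factor ls ([t] ++ []) []]
        rw [pvAFin_append, P]
        rw [show pvTakeRun (s :: ls) = ([], s :: ls) by simp [pvTakeRun, hs]]
        rw [show pvBLoop (s :: ls) = pvBLoop ls by rw [pvBLoop]; simp [hs]]
        simp
      · rw [show pvAStep ([], t) s = ([], t ++ [' '] ++ s) by simp [pvAStep, hs]]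
        rw [Q (t ++ [' '] ++ s) (by simp [ht])]
        rw [show pvTakeRun (s :: ls)
              = (s :: (pvTakeRun ls).1, (pvTakeRun ls).2) by simp [pvTakeRun, hs]]
        simp

-- ===== VERDICT (by name: the statement is the Claim_ definition above) =====
theorem split_and_concat_paragpraph_spec : Claim_equal_split_and_concat_paragpraph := by
  intro slice_text _
  unfold Spec_split_and_concat_paragpraph split_and_concat_paragpraph split_and_concat_paragpraph_alt
  simp only [(pvMain (PySem.Chars.splitOn slice_text.toList ['\n'])).1]
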